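-- pv_equiv track=rewrite | github.com/onyuki/1400-zadach-po-programmirivaniu | 11.1-11.102.py | task_11_67
-- ===== SOURCE A (Python) =====
-- from typing import List, Union, Sequence
-- from typing import List, Tuple, Union
-- from typing import List, Optional, Tuple
-- from typing import List, Tuple, Optional
-- from typing import List, Tuple, Optional
--
-- def task_11_67(residents: List[int]) -> str:
--     odd_sum = sum(residents[i] for i in range(0, len(residents), 2))
--     even_sum = sum(residents[i] for i in range(1, len(residents), 2))
--     if odd_sum > even_sum:
--         return 'odd'
--     if even_sum > odd_sum:
--         return 'even'
--     return 'equal'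
-- ===== SOURCE B (Python) =====
-- def task_11_67(residents):
--     it = iter(residents)
--     deficit = sum(b - a for a, b in zip(it, it))
--     if len(residents) % 2:
--         deficit -= residents[-1]
--     if deficit > 0:
--         return 'even'
--     if deficit < 0:
--         return 'odd'
--     return 'equal'
-- ===== Notes on version B (the rewrite author's own statement) =====
-- stated objective: alternative
-- what changed: Instead of two index-range sums compared pairwise, B zips the list with itself two-at-a-time into consecutive (even,odd) pairs, sums the per-pair differences into one deficit, subtracts a leftover last element for odd lengths, and decides by an inverted sign test.
import Mathlib
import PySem

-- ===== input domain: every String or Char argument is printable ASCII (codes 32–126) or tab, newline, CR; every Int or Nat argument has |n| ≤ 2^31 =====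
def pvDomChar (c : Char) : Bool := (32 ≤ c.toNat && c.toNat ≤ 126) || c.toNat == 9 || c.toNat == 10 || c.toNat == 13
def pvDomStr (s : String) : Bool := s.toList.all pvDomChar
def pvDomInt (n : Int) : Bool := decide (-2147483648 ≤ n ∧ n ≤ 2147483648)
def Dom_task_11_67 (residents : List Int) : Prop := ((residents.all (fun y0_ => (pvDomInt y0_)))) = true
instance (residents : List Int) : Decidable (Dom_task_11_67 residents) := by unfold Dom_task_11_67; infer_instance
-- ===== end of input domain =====

-- B replaces A's two step-2 index-range sums and pairwise compare by pairing consecutive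
-- elements (zip of one iterator with itself), summing per-pair differences into one deficit,
-- fixing up the leftover element of an odd-length list, and an inverted sign test (objective: alternative).

-- ===== PORT A =====
def task_11_67 (residents : List Int) : String :=
  let odd_sum : Int :=
    (PySem.List.pyRange 0 residents.length 2).foldl
      (fun s i => s + PySem.List.pyGetD residents i 0) 0
  let even_sum : Int :=
    (PySem.List.pyRange 1 residents.length 2).foldl
      (fun s i => s + PySem.List.pyGetD residents i 0) 0
  if odd_sum > even_sum then "odd"
  else if even_sum > odd_sum then "even"
  else "equal"

-- ===== PORT B =====
-- zip(it, it) on one iterator: consecutive two-at-a-time pairs, leftover dropped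
def pvZipSelf : List Int → List (Int × Int)
  | a :: b :: t => (a, b) :: pvZipSelf t
  | _ => []

def task_11_67_alt (residents : List Int) : String :=
  let deficit0 : Int := ((pvZipSelf residents).map (fun p => p.2 - p.1)).sum
  let deficit : Int :=
    if PySem.Int.mod residents.length 2 ≠ 0 then
      deficit0 - PySem.List.pyGetD residents (-1) 0
    else deficit0
  if deficit > 0 then "even"
  else if deficit < 0 then "odd"
  else "equal"

-- ===== PRECONDITION & SPEC =====
def Spec_task_11_67 (residents : List Int) (out : String) : Prop := out = task_11_67_alt residents
instance (residents : List Int) (out : String) : Decidable (Spec_task_11_67 residents out) := by unfold Spec_task_11_67; infer_instance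

-- ===== CLAIM (what is proved, stated in full; the proofs are below) =====
def Claim_equal_task_11_67 : Prop := ∀ (residents : List Int), Dom_task_11_67 residents → Spec_task_11_67 residents (task_11_67 residents)

-- ===== LEMMAS AND PROOFS =====

-- (E, O): sums of elements at even / odd indices
def pvEO : List Int → Int × Int
  | [] => (0, 0)
  | x :: t => (x + (pvEO t).2, (pvEO t).1)

theorem pvRange_two_cons (a b : Int) (h : a < b) :
    PySem.List.pyRange a b 2 = a :: PySem.List.pyRange (a + 2) b 2 := by
  rw [PySem.List.pyRange_of_pos a b (by norm_num),
      PySem.List.pyRange_of_pos (a + 2) b (by norm_num)]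
  have hc : (if a < b then ((b - a + 2 - 1) / 2).toNat else 0) =
      (if a + 2 < b then ((b - (a + 2) + 2 - 1) / 2).toNat else 0) + 1 := by
    split_ifs <;> omega
  rw [hc, List.range_succ_eq_map, List.map_cons, List.map_map]
  refine congrArg₂ _ (by simp) ?_
  apply List.map_congr_left
  intro k _
  simp only [Function.comp_apply, Nat.succ_eq_add_one]
  push_cast
  ring

theorem pvGetD_cons (x : Int) (t : List Int) (i : Int) (h : 0 ≤ i) :
    PySem.List.pyGetD (x :: t) (i + 1) 0 = PySem.List.pyGetD t i 0 := by
  obtain ⟨n, rfl⟩ := Int.eq_ofNat_of_zero_le h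
  rw [show ((n : Int) + 1) = ((n + 1 : Nat) : Int) by push_cast; ring,
      PySem.List.pyGetD_natCast, PySem.List.pyGetD_natCast]
  exact List.getD_cons_succ

theorem pvShift (x : Int) (t : List Int) (a c : Int) (ha : 0 ≤ a) :
    (PySem.List.pyRange (a + 1) (c + 1) 2).map (fun i => PySem.List.pyGetD (x :: t) i 0)
      = (PySem.List.pyRange a c 2).map (fun i => PySem.List.pyGetD t i 0) := by
  rw [PySem.List.pyRange_of_pos _ (c + 1) (by norm_num),
      PySem.List.pyRange_of_pos a c (by norm_num)]
  have hc : (if a + 1 < c + 1 then ((c + 1 - (a + 1) + 2 - 1) / 2).toNat else 0) =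
      (if a < c then ((c - a + 2 - 1) / 2).toNat else 0) := by
    split_ifs <;> omega
  rw [hc, List.map_map, List.map_map]
  apply List.map_congr_left
  intro k _
  simp only [Function.comp_apply]
  rw [show a + 1 + 2 * (k : Int) = (a + 2 * (k : Int)) + 1 by ring,
      pvGetD_cons x t _ (by positivity)]

theorem pvSums (xs : List Int) :
    ((PySem.List.pyRange 0 xs.length 2).map (fun i => PySem.List.pyGetD xs i 0)).sum
        = (pvEO xs).1 ∧
    ((PySem.List.pyRange 1 xs.length 2).map (fun i => PySem.List.pyGetD xs i 0)).sum
        = (pvEO xs).2 := by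
  induction xs with
  | nil => constructor <;> simp [PySem.List.pyRange, pvEO]
  | cons x t ih =>
    have hlen : ((x :: t).length : Int) = (t.length : Int) + 1 := by
      simp
    have h1 := pvShift x t 1 (t.length : Int) (by norm_num)
    have h2 := pvShift x t 0 (t.length : Int) le_rfl
    norm_num at h1 h2
    constructor
    · rw [hlen, pvRange_two_cons 0 ((t.length : Int) + 1) (by positivity),
          List.map_cons, List.sum_cons, PySem.List.pyGetD_zero_cons,
          show (0 : Int) + 2 = 2 by norm_num, h1, ih.2]
      simp [pvEO]
    · rw [hlen, h2, ih.1]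
      simp [pvEO]

theorem pvMod2 (s : Int) : PySem.Int.mod s 2 = s % 2 := by
  simp [PySem.Int.mod, Int.fmod_eq_emod]

-- B's deficit (pair sums plus odd-length fix-up) equals O - E
theorem pvDeficit : ∀ (xs : List Int),
    (if PySem.Int.mod xs.length 2 ≠ 0 then
        ((pvZipSelf xs).map (fun p => p.2 - p.1)).sum - PySem.List.pyGetD xs (-1) 0
      else ((pvZipSelf xs).map (fun p => p.2 - p.1)).sum)
      = (pvEO xs).2 - (pvEO xs).1
  | [] => by simp [pvZipSelf, pvEO]
  | [a] => by
      rw [show PySem.List.pyGetD [a] (-1) 0 = a from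
            PySem.List.pyGetD_neg_one [a] 0 (by simp) |>.trans (by simp)]
      simp [pvZipSelf, pvEO]
  | a :: b :: t => by
      have hmod : PySem.Int.mod (((a :: b :: t).length : Int)) 2
          = PySem.Int.mod ((t.length : Int)) 2 := by
        rw [pvMod2 (((a :: b :: t).length : Int)), pvMod2 ((t.length : Int))]
        simp only [List.length_cons]
        push_cast
        omega
      have ih := pvDeficit t
      by_cases ht : t = []
      · subst ht
        simp [pvZipSelf, pvEO]
      · have hlast : PySem.List.pyGetD (a :: b :: t) (-1) 0
            = PySem.List.pyGetD t (-1) 0 := by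
          rw [PySem.List.pyGetD_neg_one (a :: b :: t) 0 (by simp),
              PySem.List.pyGetD_neg_one t 0 ht]
          simp [List.getLast_cons, ht]
        rw [hmod] at *
        simp only [pvZipSelf, List.map_cons, List.sum_cons, hlast, pvEO] at *
        split_ifs at ih ⊢ <;> omega

theorem task_11_67_spec_aux (residents : List Int) :
    task_11_67 residents = task_11_67_alt residents := by
  unfold task_11_67 task_11_67_alt
  simp only [PySem.List.foldl_add, zero_add]
  rw [(pvSums residents).1, (pvSums residents).2, pvDeficit residents]
  split_ifs <;> first | rfl | omega

-- ===== VERDICT (by name: the statement is the Claim_ definition above) =====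
theorem task_11_67_spec : Claim_equal_task_11_67 := by
  intro residents _
  unfold Spec_task_11_67
  exact task_11_67_spec_aux residents
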